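-- pv_equiv track=rewrite | github.com/truongtd021-dev/8_Quan_Hau_AI | core.py | sinh_trang_thai_con
-- ===== SOURCE A (Python) =====
-- def o_hop_le(trangThai, row_next, col_next):
--     for r, c in trangThai:
--         if c == col_next: return False
--         if abs(c - col_next) == abs(r - row_next): return False
--     return True
--
-- def sinh_trang_thai_con(trangThai):
--     row_next = len(trangThai)
--     if row_next >= 8: return []
--     res = []
--     for col in range(8):
--         if o_hop_le(trangThai, row_next, col):
--             res.append(trangThai + ((row_next, col),))
--     return res
-- ===== SOURCE B (Python) =====
-- def sinh_trang_thai_con(trangThai):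
--     row_next = len(trangThai)
--     if row_next >= 8:
--         return []
--     cols, diag1, diag2 = set(), set(), set()
--     for r, c in trangThai:
--         cols.add(c)
--         diag1.add(r - c)
--         diag2.add(r + c)
--     return [trangThai + ((row_next, col),)
--             for col in range(8)
--             if col not in cols
--             and row_next - col not in diag1
--             and row_next + col not in diag2]
-- ===== Notes on version B (the rewrite author's own statement) =====
-- stated objective: idiomatic
-- what changed: One pass builds column/diagonal attack sets (c, r-c, r+c); candidate columns are then accepted by three O(1) membership tests in a comprehension, eliminating the o_hop_le rescan of the whole state per candidate.
import Mathlib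
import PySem

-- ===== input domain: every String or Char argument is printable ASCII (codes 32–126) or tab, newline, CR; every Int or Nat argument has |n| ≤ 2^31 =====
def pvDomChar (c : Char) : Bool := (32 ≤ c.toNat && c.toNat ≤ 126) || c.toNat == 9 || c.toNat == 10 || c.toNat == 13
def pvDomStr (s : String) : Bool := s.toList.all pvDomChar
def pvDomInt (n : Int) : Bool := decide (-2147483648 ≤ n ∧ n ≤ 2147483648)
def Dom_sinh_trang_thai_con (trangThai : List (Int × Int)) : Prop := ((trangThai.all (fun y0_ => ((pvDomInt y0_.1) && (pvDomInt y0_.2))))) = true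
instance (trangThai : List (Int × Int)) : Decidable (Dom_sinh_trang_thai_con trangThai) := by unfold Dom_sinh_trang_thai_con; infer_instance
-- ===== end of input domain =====

-- B replaces the per-candidate rescan (o_hop_le) by attack sets {c}, {r-c}, {r+c} built in one pass.

-- ===== PORT A =====
def o_hop_le (trangThai : List (Int × Int)) (row_next col_next : Int) : Bool :=
  match trangThai with
  | [] => true
  | (r, c) :: rest =>
    if c == col_next then false
    else if (c - col_next).natAbs == (r - row_next).natAbs then false
    else o_hop_le rest row_next col_next

def sinh_trang_thai_con (trangThai : List (Int × Int)) : List (List (Int × Int)) :=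
  let row_next : Int := trangThai.length
  if row_next ≥ 8 then []
  else
    (PySem.List.pyRange 0 8 1).foldl
      (fun res col =>
        if o_hop_le trangThai row_next col then res ++ [trangThai ++ [(row_next, col)]]
        else res) []

-- ===== PORT B =====
def sinh_trang_thai_con_alt (trangThai : List (Int × Int)) : List (List (Int × Int)) :=
  let row_next : Int := trangThai.length
  if row_next ≥ 8 then []
  else
    let sets :=
      trangThai.foldl
        (fun (s : PySem.Set Int × PySem.Set Int × PySem.Set Int) rc =>
          (PySem.Set.add s.1 rc.2, PySem.Set.add s.2.1 (rc.1 - rc.2),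
           PySem.Set.add s.2.2 (rc.1 + rc.2)))
        (PySem.Set.empty, PySem.Set.empty, PySem.Set.empty)
    ((PySem.List.pyRange 0 8 1).filter
        (fun col =>
          !(PySem.Set.contains sets.1 col) &&
          !(PySem.Set.contains sets.2.1 (row_next - col)) &&
          !(PySem.Set.contains sets.2.2 (row_next + col)))).map
      (fun col => trangThai ++ [(row_next, col)])

-- ===== PRECONDITION & SPEC =====
def Spec_sinh_trang_thai_con (trangThai : List (Int × Int)) (out : List (List (Int × Int))) : Prop := out = sinh_trang_thai_con_alt trangThai
instance (trangThai : List (Int × Int)) (out : List (List (Int × Int))) : Decidable (Spec_sinh_trang_thai_con trangThai out) := by unfold Spec_sinh_trang_thai_con; infer_instance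

-- ===== CLAIM (what is proved, stated in full; the proofs are below) =====
def Claim_equal_sinh_trang_thai_con : Prop := ∀ (trangThai : List (Int × Int)), Dom_sinh_trang_thai_con trangThai → Spec_sinh_trang_thai_con trangThai (sinh_trang_thai_con trangThai)

-- ===== LEMMAS AND PROOFS =====

/-- One step of B's attack-set fold (proof-side name for the lambda in the port). -/
def attackStep (s : PySem.Set Int × PySem.Set Int × PySem.Set Int) (rc : Int × Int) :
    PySem.Set Int × PySem.Set Int × PySem.Set Int :=
  (PySem.Set.add s.1 rc.2, PySem.Set.add s.2.1 (rc.1 - rc.2), PySem.Set.add s.2.2 (rc.1 + rc.2))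

theorem mem_fold1 (t : List (Int × Int)) (s : PySem.Set Int × PySem.Set Int × PySem.Set Int)
    (x : Int) : x ∈ (t.foldl attackStep s).1 ↔ x ∈ s.1 ∨ ∃ rc ∈ t, x = rc.2 := by
  induction t generalizing s with
  | nil => simp
  | cons hd tl ih =>
    rw [List.foldl_cons, ih]
    simp only [attackStep, PySem.Set.mem_add, List.mem_cons]
    constructor
    · rintro ((h | h) | ⟨rc, hrc, he⟩)
      · exact Or.inl h
      · exact Or.inr ⟨hd, Or.inl rfl, h⟩
      · exact Or.inr ⟨rc, Or.inr hrc, he⟩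
    · rintro (h | ⟨rc, (rfl | hrc), he⟩)
      · exact Or.inl (Or.inl h)
      · exact Or.inl (Or.inr he)
      · exact Or.inr ⟨rc, hrc, he⟩

theorem mem_fold21 (t : List (Int × Int)) (s : PySem.Set Int × PySem.Set Int × PySem.Set Int)
    (x : Int) : x ∈ (t.foldl attackStep s).2.1 ↔ x ∈ s.2.1 ∨ ∃ rc ∈ t, x = rc.1 - rc.2 := by
  induction t generalizing s with
  | nil => simp
  | cons hd tl ih =>
    rw [List.foldl_cons, ih]
    simp only [attackStep, PySem.Set.mem_add, List.mem_cons]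
    constructor
    · rintro ((h | h) | ⟨rc, hrc, he⟩)
      · exact Or.inl h
      · exact Or.inr ⟨hd, Or.inl rfl, h⟩
      · exact Or.inr ⟨rc, Or.inr hrc, he⟩
    · rintro (h | ⟨rc, (rfl | hrc), he⟩)
      · exact Or.inl (Or.inl h)
      · exact Or.inl (Or.inr he)
      · exact Or.inr ⟨rc, hrc, he⟩

theorem mem_fold22 (t : List (Int × Int)) (s : PySem.Set Int × PySem.Set Int × PySem.Set Int)
    (x : Int) : x ∈ (t.foldl attackStep s).2.2 ↔ x ∈ s.2.2 ∨ ∃ rc ∈ t, x = rc.1 + rc.2 := by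
  induction t generalizing s with
  | nil => simp
  | cons hd tl ih =>
    rw [List.foldl_cons, ih]
    simp only [attackStep, PySem.Set.mem_add, List.mem_cons]
    constructor
    · rintro ((h | h) | ⟨rc, hrc, he⟩)
      · exact Or.inl h
      · exact Or.inr ⟨hd, Or.inl rfl, h⟩
      · exact Or.inr ⟨rc, Or.inr hrc, he⟩
    · rintro (h | ⟨rc, (rfl | hrc), he⟩)
      · exact Or.inl (Or.inl h)
      · exact Or.inl (Or.inr he)
      · exact Or.inr ⟨rc, hrc, he⟩

/-- A's scan returns true iff no placed queen shares a column or a diagonal with (row, col). -/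
theorem o_hop_le_iff (t : List (Int × Int)) (row col : Int) :
    o_hop_le t row col = true ↔
      ∀ rc ∈ t, rc.2 ≠ col ∧ rc.1 - rc.2 ≠ row - col ∧ rc.1 + rc.2 ≠ row + col := by
  induction t with
  | nil => simp [o_hop_le]
  | cons hd tl ih =>
    obtain ⟨r, c⟩ := hd
    simp only [o_hop_le, List.mem_cons, forall_eq_or_imp]
    split_ifs with h1 h2
    · simp only [beq_iff_eq] at h1
      simp [h1]
    · simp only [beq_iff_eq] at h2
      simp only [false_iff, not_and]
      intro htriple _
      omega
    · simp only [beq_iff_eq] at h1 h2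
      rw [ih]
      constructor
      · intro h
        exact ⟨⟨h1, by omega, by omega⟩, h⟩
      · intro h
        exact h.2

theorem sinh_trang_thai_con_eq (t : List (Int × Int)) :
    sinh_trang_thai_con t = sinh_trang_thai_con_alt t := by
  unfold sinh_trang_thai_con sinh_trang_thai_con_alt
  by_cases h8 : (t.length : Int) ≥ 8
  · simp [h8]
  · simp only [h8, if_false]
    rw [PySem.List.foldl_append_if]
    rw [List.nil_append]
    congr 1
    apply List.filter_congr
    intro col _
    rw [Bool.eq_iff_iff, o_hop_le_iff]
    simp only [Bool.and_eq_true, Bool.not_eq_true', ← Bool.not_eq_true, PySem.Set.contains_iff,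
      show (fun (s : PySem.Set Int × PySem.Set Int × PySem.Set Int) (rc : Int × Int) =>
        (PySem.Set.add s.1 rc.2, PySem.Set.add s.2.1 (rc.1 - rc.2),
         PySem.Set.add s.2.2 (rc.1 + rc.2))) = attackStep from rfl,
      mem_fold1, mem_fold21, mem_fold22, PySem.Set.empty, List.not_mem_nil, false_or]
    constructor
    · intro h
      exact ⟨⟨fun ⟨rc, hrc, he⟩ => (h rc hrc).1 he.symm,
              fun ⟨rc, hrc, he⟩ => (h rc hrc).2.1 he.symm⟩,
             fun ⟨rc, hrc, he⟩ => (h rc hrc).2.2 he.symm⟩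
    · rintro ⟨⟨h1, h2⟩, h3⟩ rc hrc
      exact ⟨fun he => h1 ⟨rc, hrc, he.symm⟩, fun he => h2 ⟨rc, hrc, he.symm⟩,
             fun he => h3 ⟨rc, hrc, he.symm⟩⟩

-- ===== VERDICT (by name: the statement is the Claim_ definition above) =====
theorem sinh_trang_thai_con_spec : Claim_equal_sinh_trang_thai_con := by
  intro t _
  unfold Spec_sinh_trang_thai_con
  exact sinh_trang_thai_con_eq t
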